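-- pv_equiv track=rewrite | github.com/SergeiShumilin/shell_sort_analysis | new_shell_sort_analysis.py | pratt1
-- ===== SOURCE A (Python) =====
-- def pratt1(array):
--     """Generate a sorted list of products of powers of 2 and 3 below max_size"""
--     res = []
--     max_size = len(array) // 2
--     pow3 = 1  # start with q = 0
--     while pow3 <= max_size:
--         # At this point, pow3 = 3**q, so set p = 0
--         pow2 = pow3
--         while pow2 <= max_size:
--             # At this point, pow2 = 2**p * 3**q
--             res.append(pow2)
--             pow2 = pow2 * 2  # this is like adding 1 to p
--         # now that p overflowed the maximum size, add 1 to q and start over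
--         pow3 = pow3 * 3
--     return list(reversed(sorted(res)))
-- ===== SOURCE B (Python) =====
-- def pratt1(array):
--     """Generate a sorted list of products of powers of 2 and 3 below max_size"""
--     res = []
--     max_size = len(array) // 2
--     for n in range(max_size, 0, -1):
--         m = n
--         while m % 2 == 0:
--             m //= 2
--         while m % 3 == 0:
--             m //= 3
--         if m == 1:
--             res.append(n)
--     return res
-- ===== Notes on version B (the rewrite author's own statement) =====
-- stated objective: alternative
-- what changed: Instead of generating all products 2^p*3^q by nested power-multiplication loops and then sorting and reversing, B scans n from max_size down to 1, tests each n for 3-smoothness by dividing out all factors of 2 then 3, and appends the hits, so the result is produced already in descending order with no sort.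
import Mathlib
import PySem

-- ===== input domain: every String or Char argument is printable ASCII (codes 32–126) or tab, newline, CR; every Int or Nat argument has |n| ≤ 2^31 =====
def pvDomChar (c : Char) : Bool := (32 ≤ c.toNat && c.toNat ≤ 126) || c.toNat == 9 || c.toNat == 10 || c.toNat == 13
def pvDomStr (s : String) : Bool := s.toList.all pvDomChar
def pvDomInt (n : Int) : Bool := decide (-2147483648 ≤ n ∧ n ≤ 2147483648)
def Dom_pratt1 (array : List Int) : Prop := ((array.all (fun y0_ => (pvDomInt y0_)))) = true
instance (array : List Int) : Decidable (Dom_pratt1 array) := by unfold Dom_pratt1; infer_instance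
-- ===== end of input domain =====

-- B replaces A's generate-powers-then-sort with a downward scan that keeps each n whose
-- factors of 2 and 3 divide out to 1, producing the descending list directly (objective: alternative).

-- ===== PORT A =====
-- inner 'while pow2 <= max_size' loop; the fuel argument is a totality device only
-- (the callers pass enough fuel for the loop to run to its Python end)
def prattInner : Nat → Int → Int → List Int → List Int
  | 0, _, _, res => res
  | fuel + 1, maxSize, pow2, res =>
    if pow2 ≤ maxSize then prattInner fuel maxSize (pow2 * 2) (res ++ [pow2]) else res

-- outer 'while pow3 <= max_size' loop; fuel is a totality device only
def prattOuter : Nat → Int → Int → List Int → List Int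
  | 0, _, _, res => res
  | fuel + 1, maxSize, pow3, res =>
    if pow3 ≤ maxSize then
      prattOuter fuel maxSize (pow3 * 3) (prattInner (maxSize + 1).toNat maxSize pow3 res)
    else res

def pratt1 (array : List Int) : List Int :=
  let maxSize := PySem.Int.floordiv (array.length : Int) 2
  (PySem.List.sorted (prattOuter (maxSize + 1).toNat maxSize 1 []) (fun x => x) false).reverse

-- ===== PORT B =====
-- 'while m % 2 == 0: m //= 2'; fuel is a totality device only
def strip2 : Nat → Int → Int
  | 0, m => m
  | fuel + 1, m => if PySem.Int.mod m 2 = 0 then strip2 fuel (PySem.Int.floordiv m 2) else m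

-- 'while m % 3 == 0: m //= 3'; fuel is a totality device only
def strip3 : Nat → Int → Int
  | 0, m => m
  | fuel + 1, m => if PySem.Int.mod m 3 = 0 then strip3 fuel (PySem.Int.floordiv m 3) else m

def pratt1_alt (array : List Int) : List Int :=
  let maxSize := PySem.Int.floordiv (array.length : Int) 2
  (PySem.List.pyRange maxSize 0 (-1)).foldl
    (fun res n =>
      if strip3 (maxSize + 1).toNat (strip2 (maxSize + 1).toNat n) = 1 then res ++ [n] else res) []

-- ===== PRECONDITION & SPEC =====
def Spec_pratt1 (array : List Int) (out : List Int) : Prop := out = pratt1_alt array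
instance (array : List Int) (out : List Int) : Decidable (Spec_pratt1 array out) := by unfold Spec_pratt1; infer_instance

-- ===== CLAIM (what is proved, stated in full; the proofs are below) =====
def Claim_equal_pratt1 : Prop := ∀ (array : List Int), Dom_pratt1 array → Spec_pratt1 array (pratt1 array)

-- ===== LEMMAS AND PROOFS =====

theorem mem_prattInner (fuel : Nat) (maxSize s : Int) (res : List Int) (hs : 1 ≤ s)
    (hf : (maxSize + 1 - s).toNat ≤ fuel) (x : Int) :
    x ∈ prattInner fuel maxSize s res ↔ x ∈ res ∨ ∃ p : ℕ, x = 2 ^ p * s ∧ x ≤ maxSize := by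
  induction fuel generalizing s res with
  | zero =>
    have hMs : maxSize < s := by omega
    simp only [prattInner]
    refine ⟨fun hx => Or.inl hx, ?_⟩
    rintro (hx | ⟨p, rfl, hle⟩)
    · exact hx
    · exfalso
      have h1 : (1:Int) ≤ 2 ^ p := one_le_pow₀ (by norm_num)
      have : s ≤ 2 ^ p * s := le_mul_of_one_le_left (by omega) h1
      omega
  | succ fuel ih =>
    by_cases hc : s ≤ maxSize
    · rw [prattInner, if_pos hc, ih (s * 2) (res ++ [s]) (by omega) (by omega)]
      constructor
      · rintro (hx | ⟨p, rfl, hle⟩)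
        · rcases List.mem_append.1 hx with hx | hx
          · exact Or.inl hx
          · refine Or.inr ⟨0, by simpa using List.mem_singleton.1 hx, ?_⟩
            simp at hx; omega
        · exact Or.inr ⟨p + 1, by ring, hle⟩
      · rintro (hx | ⟨p, rfl, hle⟩)
        · exact Or.inl (List.mem_append_left _ hx)
        · cases p with
          | zero => exact Or.inl (List.mem_append_right _ (by simp))
          | succ p => exact Or.inr ⟨p, by ring, hle⟩
    · rw [prattInner, if_neg hc]
      refine ⟨fun hx => Or.inl hx, ?_⟩
      rintro (hx | ⟨p, rfl, hle⟩)
      · exact hx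
      · exfalso
        have h1 : (1:Int) ≤ 2 ^ p := one_le_pow₀ (by norm_num)
        have : s ≤ 2 ^ p * s := le_mul_of_one_le_left (by omega) h1
        omega

theorem mem_prattOuter (fuel : Nat) (maxSize t : Int) (res : List Int) (ht : 1 ≤ t)
    (hf : (maxSize + 1 - t).toNat ≤ fuel) (x : Int) :
    x ∈ prattOuter fuel maxSize t res ↔ x ∈ res ∨ ∃ p q : ℕ, x = 2 ^ p * 3 ^ q * t ∧ x ≤ maxSize := by
  induction fuel generalizing t res with
  | zero =>
    have hMt : maxSize < t := by omega
    simp only [prattOuter]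
    refine ⟨fun hx => Or.inl hx, ?_⟩
    rintro (hx | ⟨p, q, rfl, hle⟩)
    · exact hx
    · exfalso
      have h1 : (1:Int) ≤ 2 ^ p := one_le_pow₀ (by norm_num)
      have h2 : (1:Int) ≤ 3 ^ q := one_le_pow₀ (by norm_num)
      have h12 : (1:Int) ≤ 2 ^ p * 3 ^ q := by nlinarith
      have : t ≤ 2 ^ p * 3 ^ q * t := le_mul_of_one_le_left (by omega) h12
      omega
  | succ fuel ih =>
    by_cases hc : t ≤ maxSize
    · rw [prattOuter, if_pos hc, ih (t * 3) _ (by omega) (by omega),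
        mem_prattInner (maxSize + 1).toNat maxSize t res ht (by omega) x]
      constructor
      · rintro ((hx | ⟨p, rfl, hle⟩) | ⟨p, q, rfl, hle⟩)
        · exact Or.inl hx
        · exact Or.inr ⟨p, 0, by ring, hle⟩
        · exact Or.inr ⟨p, q + 1, by ring, hle⟩
      · rintro (hx | ⟨p, q, rfl, hle⟩)
        · exact Or.inl (Or.inl hx)
        · cases q with
          | zero => exact Or.inl (Or.inr ⟨p, by ring, hle⟩)
          | succ q => exact Or.inr ⟨p, q, by ring, hle⟩
    · rw [prattOuter, if_neg hc]
      refine ⟨fun hx => Or.inl hx, ?_⟩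
      rintro (hx | ⟨p, q, rfl, hle⟩)
      · exact hx
      · exfalso
        have h1 : (1:Int) ≤ 2 ^ p := one_le_pow₀ (by norm_num)
        have h2 : (1:Int) ≤ 3 ^ q := one_le_pow₀ (by norm_num)
        have h12 : (1:Int) ≤ 2 ^ p * 3 ^ q := by nlinarith
        have : t ≤ 2 ^ p * 3 ^ q * t := le_mul_of_one_le_left (by omega) h12
        omega

theorem nodup_prattInner (fuel : Nat) (maxSize s : Int) (res : List Int) (hs : 1 ≤ s)
    (hres : res.Nodup) (hnew : ∀ x ∈ res, ∀ p : ℕ, x ≠ 2 ^ p * s) :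
    (prattInner fuel maxSize s res).Nodup := by
  induction fuel generalizing s res with
  | zero => simpa only [prattInner] using hres
  | succ fuel ih =>
    by_cases hc : s ≤ maxSize
    · rw [prattInner, if_pos hc]
      refine ih (s * 2) (res ++ [s]) (by omega) ?_ ?_
      · refine (List.nodup_append).2 ⟨hres, List.nodup_singleton s, ?_⟩
        intro a ha b hb
        have hbs : b = s := by simpa using hb
        subst hbs
        simpa using hnew a ha 0
      · intro x hx p
        rcases List.mem_append.1 hx with hx | hx
        · have := hnew x hx (p + 1)
          intro hcontr; exact this (by rw [hcontr]; ring)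
        · have hxs : x = s := by simpa using hx
          subst hxs
          intro hcontr
          have h1 : (1:Int) ≤ 2 ^ p := one_le_pow₀ (by norm_num)
          nlinarith
    · rw [prattInner, if_neg hc]; exact hres

theorem nodup_prattOuter (fuel : Nat) (maxSize t : Int) (res : List Int) (ht : 1 ≤ t)
    (hres : res.Nodup) (hnew : ∀ x ∈ res, ∀ p q : ℕ, x ≠ 2 ^ p * 3 ^ q * t) :
    (prattOuter fuel maxSize t res).Nodup := by
  induction fuel generalizing t res with
  | zero => simpa only [prattOuter] using hres
  | succ fuel ih =>
    by_cases hc : t ≤ maxSize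
    · rw [prattOuter, if_pos hc]
      refine ih (t * 3) _ (by omega) ?_ ?_
      · exact nodup_prattInner _ maxSize t res ht hres
          (fun x hx p => by simpa using hnew x hx p 0)
      · intro x hx p q
        rcases (mem_prattInner (maxSize + 1).toNat maxSize t res ht (by omega) x).1 hx
          with hx' | ⟨a, rfl, _⟩
        · have := hnew x hx' p (q + 1)
          intro hcontr; exact this (by rw [hcontr]; ring)
        · intro hcontr
          have ht0 : t ≠ 0 := by omega
          have hcc : (2:Int) ^ a = 2 ^ p * 3 ^ (q + 1) := by
            have : (2:Int) ^ a * t = (2 ^ p * 3 ^ (q + 1)) * t := by rw [pow_succ]; nlinarith [hcontr]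
            exact mul_right_cancel₀ ht0 this
          have hdvd : (3:Int) ∣ 2 ^ a := ⟨2 ^ p * 3 ^ q, by rw [hcc]; ring⟩
          have := Int.prime_three.dvd_of_dvd_pow hdvd
          norm_num at this
    · rw [prattOuter, if_neg hc]; exact hres

theorem strip2_char (fuel : Nat) (m : Int) (hm : 1 ≤ m) (hf : m.toNat ≤ fuel) :
    ∃ p : ℕ, m = 2 ^ p * strip2 fuel m ∧ ¬ (2 ∣ strip2 fuel m) ∧ 1 ≤ strip2 fuel m := by
  induction fuel generalizing m with
  | zero => omega
  | succ fuel ih =>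
    by_cases hc : PySem.Int.mod m 2 = 0
    · have hfd : PySem.Int.floordiv m 2 = m / 2 := PySem.Int.floordiv_eq_ediv_of_pos (by norm_num)
      have hdvd : (2:Int) ∣ m := (PySem.Int.mod_eq_zero_iff_dvd m 2).1 hc
      obtain ⟨p, hp, hodd, hpos⟩ := ih (PySem.Int.floordiv m 2) (by rw [hfd]; omega) (by rw [hfd]; omega)
      have hstep : strip2 (fuel + 1) m = strip2 fuel (PySem.Int.floordiv m 2) := by
        rw [strip2, if_pos hc]
      have hme : m = 2 * (m / 2) := by omega
      refine ⟨p + 1, ?_, by rwa [hstep], by rwa [hstep]⟩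
      rw [hstep, pow_succ]
      calc m = 2 * (m / 2) := hme
      _ = 2 * (2 ^ p * strip2 fuel (PySem.Int.floordiv m 2)) := by rw [← hfd, ← hp]
      _ = 2 ^ p * 2 * strip2 fuel (PySem.Int.floordiv m 2) := by ring
    · have hstop : strip2 (fuel + 1) m = m := by rw [strip2, if_neg hc]
      have hodd : ¬ (2:Int) ∣ m := fun hd => hc ((PySem.Int.mod_eq_zero_iff_dvd m 2).2 hd)
      exact ⟨0, by rw [hstop]; ring, by rwa [hstop], by rwa [hstop]⟩

theorem strip3_char (fuel : Nat) (m : Int) (hm : 1 ≤ m) (hf : m.toNat ≤ fuel) :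
    ∃ q : ℕ, m = 3 ^ q * strip3 fuel m ∧ ¬ (3 ∣ strip3 fuel m) ∧ 1 ≤ strip3 fuel m := by
  induction fuel generalizing m with
  | zero => omega
  | succ fuel ih =>
    by_cases hc : PySem.Int.mod m 3 = 0
    · have hfd : PySem.Int.floordiv m 3 = m / 3 := PySem.Int.floordiv_eq_ediv_of_pos (by norm_num)
      have hdvd : (3:Int) ∣ m := (PySem.Int.mod_eq_zero_iff_dvd m 3).1 hc
      obtain ⟨q, hq, hodd, hpos⟩ := ih (PySem.Int.floordiv m 3) (by rw [hfd]; omega) (by rw [hfd]; omega)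
      have hstep : strip3 (fuel + 1) m = strip3 fuel (PySem.Int.floordiv m 3) := by
        rw [strip3, if_pos hc]
      have hme : m = 3 * (m / 3) := by omega
      refine ⟨q + 1, ?_, by rwa [hstep], by rwa [hstep]⟩
      rw [hstep, pow_succ]
      calc m = 3 * (m / 3) := hme
      _ = 3 * (3 ^ q * strip3 fuel (PySem.Int.floordiv m 3)) := by rw [← hfd, ← hq]
      _ = 3 ^ q * 3 * strip3 fuel (PySem.Int.floordiv m 3) := by ring
    · have hstop : strip3 (fuel + 1) m = m := by rw [strip3, if_neg hc]
      have hodd : ¬ (3:Int) ∣ m := fun hd => hc ((PySem.Int.mod_eq_zero_iff_dvd m 3).2 hd)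
      exact ⟨0, by rw [hstop]; ring, by rwa [hstop], by rwa [hstop]⟩

theorem strip2_pow_mul (u : Int) (hu : 1 ≤ u) (hodd : ¬ (2 ∣ u)) (p : ℕ) (fuel : Nat)
    (hf : ((2:Int) ^ p * u).toNat ≤ fuel + 1) :
    strip2 fuel (2 ^ p * u) = u := by
  induction p generalizing fuel with
  | zero =>
    have hnd : ¬ PySem.Int.mod u 2 = 0 := fun hmod =>
      hodd ((PySem.Int.mod_eq_zero_iff_dvd u 2).1 hmod)
    cases fuel with
    | zero => simp [strip2]
    | succ fuel => simp only [pow_zero, one_mul] at *; rw [strip2, if_neg hnd]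
  | succ p ih =>
    have h2p : (1:Int) ≤ 2 ^ p := one_le_pow₀ (by norm_num)
    have hval : (2:Int) ^ (p + 1) * u = 2 * (2 ^ p * u) := by ring
    have hpu : (1:Int) ≤ 2 ^ p * u := by nlinarith
    cases fuel with
    | zero => omega
    | succ fuel =>
      have hmod : PySem.Int.mod (2 ^ (p + 1) * u) 2 = 0 :=
        (PySem.Int.mod_eq_zero_iff_dvd _ 2).2 ⟨2 ^ p * u, by ring⟩
      rw [strip2, if_pos hmod]
      have hfd : PySem.Int.floordiv (2 ^ (p + 1) * u) 2 = 2 ^ p * u := by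
        rw [PySem.Int.floordiv_eq_ediv_of_pos (by norm_num), hval,
          Int.mul_ediv_cancel_left _ (by norm_num)]
      rw [hfd]
      exact ih fuel (by omega)

theorem strip3_pow_mul (u : Int) (hu : 1 ≤ u) (hodd : ¬ (3 ∣ u)) (q : ℕ) (fuel : Nat)
    (hf : ((3:Int) ^ q * u).toNat ≤ fuel + 1) :
    strip3 fuel (3 ^ q * u) = u := by
  induction q generalizing fuel with
  | zero =>
    have hnd : ¬ PySem.Int.mod u 3 = 0 := fun hmod =>
      hodd ((PySem.Int.mod_eq_zero_iff_dvd u 3).1 hmod)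
    cases fuel with
    | zero => simp [strip3]
    | succ fuel => simp only [pow_zero, one_mul] at *; rw [strip3, if_neg hnd]
  | succ q ih =>
    have h3q : (1:Int) ≤ 3 ^ q := one_le_pow₀ (by norm_num)
    have hval : (3:Int) ^ (q + 1) * u = 3 * (3 ^ q * u) := by ring
    have hqu : (1:Int) ≤ 3 ^ q * u := by nlinarith
    cases fuel with
    | zero => omega
    | succ fuel =>
      have hmod : PySem.Int.mod (3 ^ (q + 1) * u) 3 = 0 :=
        (PySem.Int.mod_eq_zero_iff_dvd _ 3).2 ⟨3 ^ q * u, by ring⟩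
      rw [strip3, if_pos hmod]
      have hfd : PySem.Int.floordiv (3 ^ (q + 1) * u) 3 = 3 ^ q * u := by
        rw [PySem.Int.floordiv_eq_ediv_of_pos (by norm_num), hval,
          Int.mul_ediv_cancel_left _ (by norm_num)]
      rw [hfd]
      exact ih fuel (by omega)

theorem strip_test (n : Int) (hn : 1 ≤ n) (f2 f3 : Nat) (hf2 : n.toNat ≤ f2) (hf3 : n.toNat ≤ f3) :
    strip3 f3 (strip2 f2 n) = 1 ↔ ∃ p q : ℕ, n = 2 ^ p * 3 ^ q := by
  constructor
  · intro h1
    obtain ⟨p, hp, _, hu⟩ := strip2_char f2 n hn hf2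
    have h2p : (1:Int) ≤ 2 ^ p := one_le_pow₀ (by norm_num)
    have hun : strip2 f2 n ≤ n := by nlinarith
    obtain ⟨q, hq, _, _⟩ := strip3_char f3 (strip2 f2 n) hu (by omega)
    exact ⟨p, q, by rw [hp, hq, h1, mul_one]⟩
  · rintro ⟨p, q, rfl⟩
    have hodd2 : ¬ (2:Int) ∣ 3 ^ q := fun hd => by
      have := Int.prime_two.dvd_of_dvd_pow hd; norm_num at this
    have h3q : (1:Int) ≤ 3 ^ q := one_le_pow₀ (by norm_num)
    have h2p : (1:Int) ≤ 2 ^ p := one_le_pow₀ (by norm_num)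
    have h3n : (3:Int) ^ q ≤ 2 ^ p * 3 ^ q := le_mul_of_one_le_left (by omega) h2p
    rw [strip2_pow_mul (3 ^ q) h3q hodd2 p f2 (by omega)]
    have hq1 : (3:Int) ^ q = 3 ^ q * 1 := by ring
    rw [hq1, strip3_pow_mul 1 le_rfl (by norm_num) q f3 (by omega)]

-- ===== VERDICT (by name: the statement is the Claim_ definition above) =====
theorem pratt1_spec : Claim_equal_pratt1 := by
  intro array _
  show pratt1 array = pratt1_alt array
  unfold pratt1 pratt1_alt
  set M : Int := PySem.Int.floordiv (array.length : Int) 2 with hMdef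
  have hM0 : 0 ≤ M := by
    rw [hMdef, PySem.Int.floordiv_eq_ediv_of_pos (by norm_num)]
    exact Int.ediv_nonneg (by positivity) (by norm_num)
  have hfold : (PySem.List.pyRange M 0 (-1)).foldl
      (fun res n => if strip3 (M + 1).toNat (strip2 (M + 1).toNat n) = 1 then res ++ [n] else res)
      ([] : List Int)
      = (PySem.List.pyRange M 0 (-1)).filter
          (fun n => decide (strip3 (M + 1).toNat (strip2 (M + 1).toNat n) = 1)) := by
    rw [PySem.List.foldl_append_ite_eq_filter]
    simp
  have hmemR : ∀ x : Int, x ∈ prattOuter (M + 1).toNat M 1 [] ↔ ∃ p q : ℕ, x = 2 ^ p * 3 ^ q ∧ x ≤ M := by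
    intro x
    rw [mem_prattOuter (M + 1).toNat M 1 [] le_rfl (by omega) x]
    simp [mul_one]
  set B : List Int := (PySem.List.pyRange M 0 (-1)).filter
      (fun n => decide (strip3 (M + 1).toNat (strip2 (M + 1).toNat n) = 1)) with hBdef
  have hmemB : ∀ x : Int, x ∈ B ↔ ∃ p q : ℕ, x = 2 ^ p * 3 ^ q ∧ x ≤ M := by
    intro x
    rw [hBdef, List.mem_filter, PySem.List.mem_pyRange_neg_one]
    constructor
    · rintro ⟨⟨h0, hle⟩, htest⟩
      obtain ⟨p, q, rfl⟩ := (strip_test x (by omega) (M + 1).toNat (M + 1).toNat (by omega) (by omega)).1 (by simpa using htest)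
      exact ⟨p, q, rfl, hle⟩
    · rintro ⟨p, q, rfl, hle⟩
      have hpos : (0:Int) < 2 ^ p * 3 ^ q := by positivity
      exact ⟨⟨hpos, hle⟩,
        by simpa using (strip_test _ (by omega) (M + 1).toNat (M + 1).toNat (by omega) (by omega)).2 ⟨p, q, rfl⟩⟩
  have hpairB : B.Pairwise (· > ·) := by
    refine List.Pairwise.filter _ ?_
    rw [PySem.List.pyRange_neg_one_eq_reverse, List.pairwise_reverse]
    exact PySem.List.pairwise_lt_pyRange_one (0 + 1) (M + 1)
  have hpairBrev : B.reverse.Pairwise (· < ·) := by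
    rw [List.pairwise_reverse]; exact hpairB
  have hnodupR : (prattOuter (M + 1).toNat M 1 []).Nodup :=
    nodup_prattOuter (M + 1).toNat M 1 [] le_rfl List.nodup_nil (by simp)
  have hnodupBrev : B.reverse.Nodup := hpairBrev.imp (fun h => ne_of_lt h)
  have hperm : B.reverse.Perm (prattOuter (M + 1).toNat M 1 []) := by
    refine (List.perm_ext_iff_of_nodup hnodupBrev hnodupR).2 ?_
    intro x
    rw [List.mem_reverse, hmemB, hmemR]
  have hsorted : PySem.List.sorted (prattOuter (M + 1).toNat M 1 []) (fun x => x) false = B.reverse :=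
    PySem.List.sorted_eq_of_perm_of_pairwise_lt _ _ _ hperm hpairBrev
  show (PySem.List.sorted (prattOuter (M + 1).toNat M 1 []) (fun x => x) false).reverse
      = List.foldl
          (fun res n => if strip3 (M + 1).toNat (strip2 (M + 1).toNat n) = 1 then res ++ [n] else res)
          [] (PySem.List.pyRange M 0 (-1))
  rw [hsorted, List.reverse_reverse, hfold]
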